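-- pv_equiv track=rewrite | github.com/amIFabi/Fi-Simulator | src/Analysis.py | getTrinomialRow
-- ===== SOURCE A (Python) =====
-- def getTrinomialRow(n):
-- 	if(len(n) == 1):
-- 		n.append(1)
--
-- 		return n
-- 	else:
-- 		nt = []
-- 		nt.append((n[0] +  (n[1] * 2)))
-- 		for i in range(1, (len(n))):
-- 			if(i != (len(n) - 1)):
-- 				k = n[i - 1] + n[i] + n[i + 1]
-- 			else:
-- 				k = n[i - 1] + n[i]
-- 			nt.append(k)
-- 		nt.append(1)
--
-- 		return nt
-- ===== SOURCE B (Python) =====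
-- def getTrinomialRow(n):
--     if len(n) == 1:
--         n.append(1)
--         return n
--     # prefix-sum sliding window: pad the row, take cumulative sums once,
--     # each output entry is a difference of two prefix sums three apart
--     ext = [n[1]] + list(n) + [0]
--     P = [0]
--     for x in ext:
--         P.append(P[-1] + x)
--     return [P[i + 3] - P[i] for i in range(len(n))] + [1]
-- ===== Notes on version B (the rewrite author's own statement) =====
-- stated objective: alternative
-- what changed: A's single per-index loop with special-cased first/last branches is replaced by a staged prefix-sum (cumulative sum) pass over the padded row, each output entry computed as a difference of two prefix sums three apart, with no per-element branches; B also leaves n unmutated in the general branch.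
import Mathlib
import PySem

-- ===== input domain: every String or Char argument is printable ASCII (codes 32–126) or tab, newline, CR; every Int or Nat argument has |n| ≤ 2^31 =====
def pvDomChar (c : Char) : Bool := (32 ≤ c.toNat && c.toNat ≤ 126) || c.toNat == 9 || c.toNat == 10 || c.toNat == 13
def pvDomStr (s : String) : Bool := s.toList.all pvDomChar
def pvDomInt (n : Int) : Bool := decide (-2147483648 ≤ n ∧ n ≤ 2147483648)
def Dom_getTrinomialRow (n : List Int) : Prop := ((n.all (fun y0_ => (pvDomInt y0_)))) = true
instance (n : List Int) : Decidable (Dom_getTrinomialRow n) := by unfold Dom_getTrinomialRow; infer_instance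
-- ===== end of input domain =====

-- B replaces A's per-index loop with its special-cased first/last branches by a staged
-- prefix-sum pass over the padded row: each output entry is a difference of two
-- cumulative sums three apart (objective: alternative).  Return values agree; in the
-- general branch B returns a fresh list without mutating n; in the len==1 branch both
-- append to n.

-- ===== PORT A =====
def getTrinomialRow (n : List Int) : List Int :=
  if n.length = 1 then
    n ++ [1]
  else
    let nt : List Int := []
    let nt := nt ++ [PySem.List.pyGetD n 0 0 + PySem.List.pyGetD n 1 0 * 2]
    let nt := (PySem.List.pyRange 1 (n.length : Int) 1).foldl (fun nt i =>
      let k : Int :=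
        if i ≠ (n.length : Int) - 1 then
          PySem.List.pyGetD n (i - 1) 0 + PySem.List.pyGetD n i 0 + PySem.List.pyGetD n (i + 1) 0
        else
          PySem.List.pyGetD n (i - 1) 0 + PySem.List.pyGetD n i 0
      nt ++ [k]) nt
    nt ++ [1]

-- ===== PORT B =====
def getTrinomialRow_alt (n : List Int) : List Int :=
  if n.length = 1 then
    n ++ [1]
  else
    let ext : List Int := [PySem.List.pyGetD n 1 0] ++ n ++ [0]
    let P : List Int := ext.foldl (fun P x => P ++ [PySem.List.pyGetD P (-1) 0 + x]) [0]
    ((PySem.List.pyRange 0 (n.length : Int) 1).map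
      (fun i => PySem.List.pyGetD P (i + 3) 0 - PySem.List.pyGetD P i 0)) ++ [1]

-- ===== PRECONDITION & SPEC =====
-- Pre_ excludes only the empty list, on which Python A raises IndexError (n[0]); B raises there too (n[1]).
def Pre_getTrinomialRow (n : List Int) : Prop := n ≠ []
instance (n : List Int) : Decidable (Pre_getTrinomialRow n) := by unfold Pre_getTrinomialRow; infer_instance
def pvWitness_getTrinomialRow : List Int := [1, 1]

def Spec_getTrinomialRow (n : List Int) (out : List Int) : Prop := out = getTrinomialRow_alt n
instance (n : List Int) (out : List Int) : Decidable (Spec_getTrinomialRow n out) := by unfold Spec_getTrinomialRow; infer_instance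

-- ===== CLAIM (what is proved, stated in full; the proofs are below) =====
def Claim_equal_getTrinomialRow : Prop := ∀ (n : List Int), Dom_getTrinomialRow n → Pre_getTrinomialRow n → Spec_getTrinomialRow n (getTrinomialRow n)

-- ===== LEMMAS AND PROOFS =====

-- the running prefix sums appended by B's accumulation loop
def psums (s : Int) : List Int → List Int
  | [] => []
  | x :: xs => (s + x) :: psums (s + x) xs

theorem psums_length (s : Int) (l : List Int) : (psums s l).length = l.length := by
  induction l generalizing s with
  | nil => simp [psums]
  | cons x xs ih => simp [psums, ih]

theorem fold_psums : ∀ (l acc : List Int) (h : acc ≠ []),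
    l.foldl (fun P x => P ++ [PySem.List.pyGetD P (-1) 0 + x]) acc
      = acc ++ psums (acc.getLast h) l
  | [], acc, h => by simp [psums]
  | x :: xs, acc, h => by
      have hne : acc ++ [acc.getLast h + x] ≠ [] := by simp
      have hlast : (acc ++ [acc.getLast h + x]).getLast hne = acc.getLast h + x := by
        simp
      calc (x :: xs).foldl (fun P y => P ++ [PySem.List.pyGetD P (-1) 0 + y]) acc
          = xs.foldl (fun P y => P ++ [PySem.List.pyGetD P (-1) 0 + y])
              (acc ++ [acc.getLast h + x]) := by
            simp [List.foldl_cons, PySem.List.pyGetD_neg_one acc 0 h]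
        _ = (acc ++ [acc.getLast h + x])
              ++ psums ((acc ++ [acc.getLast h + x]).getLast hne) xs :=
            fold_psums xs _ hne
        _ = acc ++ psums (acc.getLast h) (x :: xs) := by
            rw [hlast]; simp [psums]

theorem psums_get : ∀ (l : List Int) (s : Int) (j : Nat) (h : j < l.length),
    (psums s l)[j]'(by rw [psums_length]; exact h) = s + (l.take (j + 1)).sum
  | x :: xs, s, 0, h => by simp [psums]
  | x :: xs, s, j + 1, h => by
      have := psums_get xs (s + x) j (by simpa using h)
      simp only [psums, List.getElem_cons_succ, this, List.take_succ_cons, List.sum_cons]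
      ring

-- elements of B's padded extension ext = [n[1]] ++ n ++ [0]
theorem ext_get0 (n : List Int) (hm : 2 ≤ n.length) :
    ([PySem.List.pyGetD n 1 0] ++ n ++ [0])[0]'(by simp) = n[1]'(by omega) := by
  rw [PySem.List.pyGetD_eq_getElem n 0 (by omega) (by exact_mod_cast (by omega : 1 < n.length))]
  simp

theorem ext_get_mid (n : List Int) (k : Nat) (h1 : 1 ≤ k) (h2 : k ≤ n.length) :
    ([PySem.List.pyGetD n 1 0] ++ n ++ [0])[k]'(by simp; omega) = n[k-1]'(by omega) := by
  rw [List.getElem_append_left (by simp; omega),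
      List.getElem_append_right (by simp; omega)]
  simp

theorem ext_get_top' (n : List Int) (k : Nat) (hk : k = n.length + 1) :
    ([PySem.List.pyGetD n 1 0] ++ n ++ [0])[k]'(by simp; omega) = 0 := by
  subst hk
  have hge : ([PySem.List.pyGetD n 1 0] ++ n).length ≤ n.length + 1 := by simp
  rw [List.getElem_append_right hge]
  simp

-- pyGetD at a nonnegative Nat-cast index
theorem pyGetD_nat (n : List Int) (j : Nat) (hj : j < n.length) :
    PySem.List.pyGetD n (j : Int) 0 = n[j] := by
  rw [PySem.List.pyGetD_eq_getElem n 0 (by omega) (by exact_mod_cast hj)]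
  simp

-- P = [0] ++ psums 0 ext indexes to partial sums of ext
theorem P_get (ext : List Int) (k : Nat) (hk : k ≤ ext.length) :
    ([0] ++ psums 0 ext)[k]'(by simp [psums_length]; omega) = (ext.take k).sum := by
  cases k with
  | zero => simp
  | succ j =>
      have h1 : ([0] : List Int).length ≤ j + 1 := by simp
      rw [List.getElem_append_right h1]
      simpa using psums_get ext 0 j (by omega)

-- B's general-branch value, element by element: a window sum of ext
theorem B_elem (n : List Int) (i : Nat) (hi : i < n.length) :
    PySem.List.pyGetD ([0] ++ psums 0 ([PySem.List.pyGetD n 1 0] ++ n ++ [0])) ((i : Int) + 3) 0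
      - PySem.List.pyGetD ([0] ++ psums 0 ([PySem.List.pyGetD n 1 0] ++ n ++ [0])) (i : Int) 0
    = ([PySem.List.pyGetD n 1 0] ++ n ++ [0])[i]'(by simp; omega)
      + ([PySem.List.pyGetD n 1 0] ++ n ++ [0])[i+1]'(by simp; omega)
      + ([PySem.List.pyGetD n 1 0] ++ n ++ [0])[i+2]'(by simp; omega) := by
  have hextlen : ([PySem.List.pyGetD n 1 0] ++ n ++ [0]).length = n.length + 2 := by simp
  have hPlen : (([0] : List Int) ++ psums 0 ([PySem.List.pyGetD n 1 0] ++ n ++ [0])).length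
      = n.length + 3 := by simp [psums_length]
  have hc3 : ((i : Int) + 3) = ((i + 3 : Nat) : Int) := by omega
  rw [hc3, pyGetD_nat _ (i + 3) (by omega), pyGetD_nat _ i (by omega),
      P_get _ (i + 3) (by omega), P_get _ i (by omega)]
  have e0 := List.sum_take_succ _ i (by omega : i < ([PySem.List.pyGetD n 1 0] ++ n ++ [0]).length)
  have e1 := List.sum_take_succ _ (i+1) (by omega : i+1 < ([PySem.List.pyGetD n 1 0] ++ n ++ [0]).length)
  have e2 := List.sum_take_succ _ (i+2) (by omega : i+2 < ([PySem.List.pyGetD n 1 0] ++ n ++ [0]).length)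
  rw [show (i + 2) + 1 = i + 3 from by omega] at e2
  rw [show (i + 1) + 1 = i + 2 from by omega] at e1
  rw [e2, e1, e0]
  ring

theorem getTrinomialRow_spec' (n : List Int) (hne : n ≠ []) :
    getTrinomialRow n = getTrinomialRow_alt n := by
  by_cases h1 : n.length = 1
  · simp [getTrinomialRow, getTrinomialRow_alt, h1]
  · have hm : 2 ≤ n.length := by
      cases n with
      | nil => exact absurd rfl hne
      | cons a t => cases t with
        | nil => simp at h1
        | cons b u => simp
    simp only [getTrinomialRow, getTrinomialRow_alt, if_neg h1, List.nil_append]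
    rw [PySem.List.foldl_append_singleton_eq_map]
    rw [fold_psums _ [0] (by simp)]
    have hlast0 : (([0] : List Int)).getLast (by simp) = 0 := by simp
    rw [hlast0]
    have hmaplen :
        ((PySem.List.pyRange 1 (n.length : Int) 1).map (fun i =>
          if i ≠ (n.length : Int) - 1 then
            PySem.List.pyGetD n (i - 1) 0 + PySem.List.pyGetD n i 0 + PySem.List.pyGetD n (i + 1) 0
          else
            PySem.List.pyGetD n (i - 1) 0 + PySem.List.pyGetD n i 0)).length = n.length - 1 := by
      simp [PySem.List.length_pyRange_one]
    have hBmaplen :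
        ((PySem.List.pyRange 0 (n.length : Int) 1).map (fun i =>
          PySem.List.pyGetD ([0] ++ psums 0 ([PySem.List.pyGetD n 1 0] ++ n ++ [0])) (i + 3) 0
          - PySem.List.pyGetD ([0] ++ psums 0 ([PySem.List.pyGetD n 1 0] ++ n ++ [0])) i 0)).length
        = n.length := by
      simp [PySem.List.length_pyRange_one]
    apply List.ext_getElem
    · simp only [List.length_append, List.length_cons, List.length_nil, hmaplen, hBmaplen]
      omega
    · intro i hL hR
      have hXlen : ([PySem.List.pyGetD n 0 0 + PySem.List.pyGetD n 1 0 * 2] ++ ((PySem.List.pyRange 1 (n.length : Int) 1).map (fun i =>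
          if i ≠ (n.length : Int) - 1 then
            PySem.List.pyGetD n (i - 1) 0 + PySem.List.pyGetD n i 0 + PySem.List.pyGetD n (i + 1) 0
          else
            PySem.List.pyGetD n (i - 1) 0 + PySem.List.pyGetD n i 0))).length = n.length := by
        simp only [List.length_append, List.length_cons, List.length_nil, hmaplen]
        omega
      have hiL : i < n.length + 1 := by
        have := hL
        rw [List.length_append, hXlen] at this
        simpa using this
      by_cases him : i < n.length
      · -- inside the mapped-range part on both sides
        have hA1 : i < ([PySem.List.pyGetD n 0 0 + PySem.List.pyGetD n 1 0 * 2] ++ ((PySem.List.pyRange 1 (n.length : Int) 1).map (fun i =>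
          if i ≠ (n.length : Int) - 1 then
            PySem.List.pyGetD n (i - 1) 0 + PySem.List.pyGetD n i 0 + PySem.List.pyGetD n (i + 1) 0
          else
            PySem.List.pyGetD n (i - 1) 0 + PySem.List.pyGetD n i 0))).length := by rw [hXlen]; exact him
        have hB1 : i < ((PySem.List.pyRange 0 (n.length : Int) 1).map (fun i =>
          PySem.List.pyGetD ([0] ++ psums 0 ([PySem.List.pyGetD n 1 0] ++ n ++ [0])) (i + 3) 0
          - PySem.List.pyGetD ([0] ++ psums 0 ([PySem.List.pyGetD n 1 0] ++ n ++ [0])) i 0)).length := by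
          rw [hBmaplen]; exact him
        rw [List.getElem_append_left hA1, List.getElem_append_left hB1, List.getElem_map,
            PySem.List.getElem_pyRange_one]
        have hzero : ((0 : Int) + ((i : Nat) : Int)) = (i : Int) := by omega
        rw [hzero, B_elem n i him]
        rcases Nat.eq_zero_or_pos i with hi0 | hipos
        · -- first entry: n[0] + n[1]*2  vs  n[1] + n[0] + n[1]
          subst hi0
          have h0 : 0 < ([PySem.List.pyGetD n 0 0 + PySem.List.pyGetD n 1 0 * 2] : List Int).length := by simp
          rw [List.getElem_append_left h0,
              ext_get0 n hm,
              ext_get_mid n 1 (by omega) (by omega),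
              ext_get_mid n 2 (by omega) (by omega)]
          have e0 : PySem.List.pyGetD n 0 0 = n[0]'(by omega) := by
            have := pyGetD_nat n 0 (by omega); simpa using this
          have e1 : PySem.List.pyGetD n 1 0 = n[1]'(by omega) := by
            have := pyGetD_nat n 1 (by omega); simpa using this
          simp only [List.getElem_cons_zero, e0, e1]
          simp
          ring
        · -- entries 1 … n.length-1 come from A's mapped range
          have hge : ([PySem.List.pyGetD n 0 0 + PySem.List.pyGetD n 1 0 * 2] : List Int).length ≤ i := by simp; omega
          rw [List.getElem_append_right hge, List.getElem_map, PySem.List.getElem_pyRange_one]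
          simp only [List.length_cons, List.length_nil]
          have hcast1 : (1 : Int) + ((i - 1 : Nat) : Int) = (i : Int) := by omega
          rw [hcast1]
          have em1 : PySem.List.pyGetD n ((i : Int) - 1) 0 = n[i-1]'(by omega) := by
            have h' : ((i : Int) - 1) = ((i - 1 : Nat) : Int) := by omega
            rw [h', pyGetD_nat n (i-1) (by omega)]
          have em0 : PySem.List.pyGetD n (i : Int) 0 = n[i]'(by omega) :=
            pyGetD_nat n i (by omega)
          rw [ext_get_mid n i (by omega) (by omega),
              ext_get_mid n (i + 1) (by omega) (by omega)]
          by_cases hlast : i = n.length - 1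
          · have hc : ¬ ((i : Int) ≠ (n.length : Int) - 1) := by omega
            have htop : i + 2 = n.length + 1 := by omega
            rw [if_neg hc, em1, em0, ext_get_top' n (i + 2) htop]
            have h2 : i + 1 - 1 = i := by omega
            simp [h2]
          · have hc : (i : Int) ≠ (n.length : Int) - 1 := by omega
            rw [if_pos hc, em1, em0,
                ext_get_mid n (i + 2) (by omega) (by omega)]
            have ep1 : PySem.List.pyGetD n ((i : Int) + 1) 0 = n[i+1]'(by omega) := by
              have h' : ((i : Int) + 1) = ((i + 1 : Nat) : Int) := by omega
              rw [h', pyGetD_nat n (i+1) (by omega)]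
            rw [ep1]
            have h2 : i + 1 - 1 = i := by omega
            have h3 : i + 2 - 1 = i + 1 := by omega
            simp [h2, h3]
      · -- last entry: both sides end in 1
        have him' : i = n.length := by omega
        subst him'
        have hA2 : ([PySem.List.pyGetD n 0 0 + PySem.List.pyGetD n 1 0 * 2] ++ ((PySem.List.pyRange 1 (n.length : Int) 1).map (fun i =>
          if i ≠ (n.length : Int) - 1 then
            PySem.List.pyGetD n (i - 1) 0 + PySem.List.pyGetD n i 0 + PySem.List.pyGetD n (i + 1) 0
          else
            PySem.List.pyGetD n (i - 1) 0 + PySem.List.pyGetD n i 0))).length ≤ n.length := by rw [hXlen]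
        have hB2 : ((PySem.List.pyRange 0 (n.length : Int) 1).map (fun i =>
          PySem.List.pyGetD ([0] ++ psums 0 ([PySem.List.pyGetD n 1 0] ++ n ++ [0])) (i + 3) 0
          - PySem.List.pyGetD ([0] ++ psums 0 ([PySem.List.pyGetD n 1 0] ++ n ++ [0])) i 0)).length
          ≤ n.length := by rw [hBmaplen]
        rw [List.getElem_append_right hA2, List.getElem_append_right hB2]
        simp

-- ===== VERDICT (by name: the statement is the Claim_ definition above) =====
theorem getTrinomialRow_spec : Claim_equal_getTrinomialRow := by
  intro n _ hpre
  exact getTrinomialRow_spec' n hpre
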